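-- pv_equiv track=rewrite | github.com/TheoPratsRioufol/AutonomousSailboat | Posidonie/VPP Program/utils/Utils.py | getFraming
-- ===== SOURCE A (Python) =====
-- def getFraming(dic, value):
--     """
--     Return the previous and following key that closly frame value
--     """
--     orderedKeys = sorted(dic.keys())
--     if (value <= orderedKeys[0]):
--         return orderedKeys[0], orderedKeys[1]
--     idx = len(orderedKeys)-1
--     for i in range(1,len(orderedKeys)):
--         if (orderedKeys[i-1] < value) and (orderedKeys[i] >= value):
--             idx = i
--             break
--     return orderedKeys[idx-1], orderedKeys[idx]
-- ===== SOURCE B (Python) =====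
-- def getFraming(dic, value):
--     """
--     Return the previous and following key that closly frame value
--     """
--     keys = sorted(dic)
--     if value <= keys[0]:
--         return keys[0], keys[1]
--     # binary search for the first key >= value (hand-rolled bisect_left)
--     lo, hi = 0, len(keys)
--     while lo < hi:
--         mid = (lo + hi) // 2
--         if keys[mid] < value:
--             lo = mid + 1
--         else:
--             hi = mid
--     if lo == len(keys):
--         lo = len(keys) - 1
--     return keys[lo - 1], keys[lo]
-- ===== Notes on version B (the rewrite author's own statement) =====
-- stated objective: alternative
-- what changed: The linear first-match scan over adjacent key pairs is replaced by a hand-written binary search (bisect_left) for the first key >= value, clamped to the last index when value exceeds every key.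
import Mathlib
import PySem

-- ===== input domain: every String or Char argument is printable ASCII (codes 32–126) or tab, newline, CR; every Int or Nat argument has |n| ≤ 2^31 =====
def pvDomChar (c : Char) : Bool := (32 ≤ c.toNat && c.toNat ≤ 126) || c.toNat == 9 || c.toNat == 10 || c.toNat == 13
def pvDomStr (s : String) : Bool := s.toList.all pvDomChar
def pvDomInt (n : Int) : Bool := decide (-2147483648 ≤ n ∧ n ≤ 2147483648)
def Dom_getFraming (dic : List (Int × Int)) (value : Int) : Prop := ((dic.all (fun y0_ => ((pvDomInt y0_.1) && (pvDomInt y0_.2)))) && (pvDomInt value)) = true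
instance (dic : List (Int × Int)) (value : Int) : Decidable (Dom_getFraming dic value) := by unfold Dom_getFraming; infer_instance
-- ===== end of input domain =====

-- B replaces A's linear scan for the framing pair by a hand-written binary search (bisect_left)
-- over the same sorted key list; same return value everywhere A returns (return-value equivalence).

-- ===== PORT A =====
-- `for i in range(1, len(orderedKeys))` with `break`: returns the first matching i, else the initial idx.
-- Every index the Python reads is in range on admitted inputs, so `(pyGet? …).getD 0` is exact there.
def getFramingScan (ks : List Int) (value : Int) : List Int → Int → Int
  | [], idx => idx
  | i :: rest, idx =>
    if ((PySem.List.pyGet? ks (i - 1)).getD 0 < value) ∧ (value ≤ (PySem.List.pyGet? ks i).getD 0) then i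
    else getFramingScan ks value rest idx

def getFraming (dic : List (Int × Int)) (value : Int) : Int × Int :=
  let orderedKeys := PySem.List.sorted ((PySem.Dict.ofList dic).keys) id
  if value ≤ (PySem.List.pyGet? orderedKeys 0).getD 0 then
    ((PySem.List.pyGet? orderedKeys 0).getD 0, (PySem.List.pyGet? orderedKeys 1).getD 0)
  else
    let idx := getFramingScan orderedKeys value
        (PySem.List.pyRange 1 (orderedKeys.length : Int)) ((orderedKeys.length : Int) - 1)
    ((PySem.List.pyGet? orderedKeys (idx - 1)).getD 0, (PySem.List.pyGet? orderedKeys idx).getD 0)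

-- ===== PORT B =====
-- the `while lo < hi` loop of Source B, step for step
def bsearchLow (ks : List Int) (value : Int) (lo hi : Int) : Int :=
  if h : lo < hi then
    let mid := PySem.Int.floordiv (lo + hi) 2
    if (PySem.List.pyGet? ks mid).getD 0 < value then bsearchLow ks value (mid + 1) hi
    else bsearchLow ks value lo mid
  else lo
termination_by (hi - lo).toNat
decreasing_by
  · have hm : PySem.Int.floordiv (lo + hi) 2 = (lo + hi) / 2 :=
      PySem.Int.floordiv_eq_ediv_of_pos (by norm_num)
    rw [hm]; omega
  · have hm : PySem.Int.floordiv (lo + hi) 2 = (lo + hi) / 2 :=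
      PySem.Int.floordiv_eq_ediv_of_pos (by norm_num)
    rw [hm]; omega

def getFraming_alt (dic : List (Int × Int)) (value : Int) : Int × Int :=
  let keys := PySem.List.sorted ((PySem.Dict.ofList dic).keys) id
  if value ≤ (PySem.List.pyGet? keys 0).getD 0 then
    ((PySem.List.pyGet? keys 0).getD 0, (PySem.List.pyGet? keys 1).getD 0)
  else
    let lo := bsearchLow keys value 0 (keys.length : Int)
    let lo' := if lo = (keys.length : Int) then (keys.length : Int) - 1 else lo
    ((PySem.List.pyGet? keys (lo' - 1)).getD 0, (PySem.List.pyGet? keys lo').getD 0)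

-- ===== PRECONDITION & SPEC =====
-- Pre_ excludes exactly the inputs where the Python A raises IndexError: an empty dict
-- (orderedKeys[0]), and a single-key dict with value ≤ that key (orderedKeys[1]).
def Pre_getFraming (dic : List (Int × Int)) (value : Int) : Prop :=
  let ks := PySem.List.sorted ((PySem.Dict.ofList dic).keys) id
  ks ≠ [] ∧ (value ≤ ks.headD 0 → 2 ≤ ks.length)

instance (dic : List (Int × Int)) (value : Int) : Decidable (Pre_getFraming dic value) := by
  unfold Pre_getFraming; infer_instance

def pvWitness_getFraming : (List (Int × Int)) × Int := ([(1, 10), (3, 30)], 2)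

def Spec_getFraming (dic : List (Int × Int)) (value : Int) (out : Int × Int) : Prop := out = getFraming_alt dic value
instance (dic : List (Int × Int)) (value : Int) (out : Int × Int) : Decidable (Spec_getFraming dic value out) := by unfold Spec_getFraming; infer_instance

-- ===== CLAIM (what is proved, stated in full; the proofs are below) =====
def Claim_equal_getFraming : Prop := ∀ (dic : List (Int × Int)) (value : Int), Dom_getFraming dic value → Pre_getFraming dic value → Spec_getFraming dic value (getFraming dic value)

-- ===== LEMMAS AND PROOFS =====

-- the index of the first element ≥ value (= list length when there is none)
def lowIdx (value : Int) : List Int → Nat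
  | [] => 0
  | k :: ks => if value ≤ k then 0 else lowIdx value ks + 1

lemma lowIdx_le_length (value : Int) (ks : List Int) : lowIdx value ks ≤ ks.length := by
  induction ks with
  | nil => simp [lowIdx]
  | cons k ks ih => simp only [lowIdx, List.length_cons]; split <;> omega

lemma getElem_lt_of_lt_lowIdx (value : Int) (ks : List Int) (j : Nat) (hj : j < ks.length)
    (h : j < lowIdx value ks) : ks[j] < value := by
  induction ks generalizing j with
  | nil => simp at hj
  | cons k ks ih =>
    simp only [lowIdx] at h
    split at h
    · omega
    · cases j with
      | zero => simpa using by omega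
      | succ j => exact ih j (by simpa using hj) (by omega)

lemma le_getElem_lowIdx (value : Int) (ks : List Int) (h : lowIdx value ks < ks.length) :
    value ≤ ks[lowIdx value ks] := by
  induction ks with
  | nil => simp at h
  | cons k ks ih =>
    by_cases hk : value ≤ k
    · simp [lowIdx, hk]
    · have h' : lowIdx value ks < ks.length := by
        simp only [lowIdx, hk, if_false, List.length_cons] at h; omega
      simpa [lowIdx, hk] using ih h'

lemma one_le_lowIdx (value : Int) (ks : List Int) (h0 : 0 < ks.length)
    (h : ¬ value ≤ ks[0]) : 1 ≤ lowIdx value ks := by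
  cases ks with
  | nil => simp at h0
  | cons k t =>
    simp only [List.getElem_cons_zero] at h
    simp [lowIdx, h]

-- binary search computes lowIdx on a ≤-sorted list
lemma bsearchLow_eq (ks : List Int) (value : Int)
    (hpw : ks.Pairwise (· ≤ ·)) (lo hi : Int)
    (h0 : 0 ≤ lo) (hlh : lo ≤ hi) (hhn : hi ≤ (ks.length : Int))
    (hinv1 : ∀ j : Nat, (hj : j < ks.length) → (j : Int) < lo → ks[j] < value)
    (hinv2 : ∀ j : Nat, (hj : j < ks.length) → hi ≤ (j : Int) → value ≤ ks[j]) :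
    bsearchLow ks value lo hi = (lowIdx value ks : Int) := by
  rw [bsearchLow]
  split
  · rename_i h
    have hm : PySem.Int.floordiv (lo + hi) 2 = (lo + hi) / 2 :=
      PySem.Int.floordiv_eq_ediv_of_pos (by norm_num)
    have hb1 : lo ≤ PySem.Int.floordiv (lo + hi) 2 := by rw [hm]; omega
    have hb2 : PySem.Int.floordiv (lo + hi) 2 < hi := by rw [hm]; omega
    set mid := PySem.Int.floordiv (lo + hi) 2 with hmid
    have hmn : mid < (ks.length : Int) := lt_of_lt_of_le hb2 hhn
    have hm0 : 0 ≤ mid := le_trans h0 hb1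
    have hmn' : mid.toNat < ks.length := by omega
    have hget : PySem.List.pyGet? ks mid = some (ks[mid.toNat]'hmn') :=
      PySem.List.pyGet?_eq_some_getElem ks hm0 hmn
    simp only [hget, Option.getD_some]
    split
    · rename_i hlt
      exact bsearchLow_eq ks value hpw (mid + 1) hi (by omega) (by omega) hhn
        (fun j hj hjlt => by
          have hle : ks[j] ≤ ks[mid.toNat] := by
            rcases Nat.lt_or_ge j mid.toNat with hc | hc
            · exact List.pairwise_iff_getElem.mp hpw j mid.toNat hj hmn' hc
            · have : j = mid.toNat := by omega
              subst this; exact le_refl _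
          exact lt_of_le_of_lt hle hlt)
        hinv2
    · rename_i hge
      exact bsearchLow_eq ks value hpw lo mid h0 (by omega) (by omega)
        hinv1
        (fun j hj hjge => by
          have hle : ks[mid.toNat] ≤ ks[j] := by
            rcases Nat.lt_or_ge mid.toNat j with hc | hc
            · exact List.pairwise_iff_getElem.mp hpw mid.toNat j hmn' hj hc
            · have : mid.toNat = j := by omega
              subst this; exact le_refl _
          omega)
  · rename_i h
    have hL := lowIdx_le_length value ks
    have hub : lo ≤ (lowIdx value ks : Int) := by
      by_contra hc
      have hjlen : lowIdx value ks < ks.length := by omega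
      have h1 := hinv1 (lowIdx value ks) hjlen (by omega)
      have h2 := le_getElem_lowIdx value ks hjlen
      omega
    have hlb : (lowIdx value ks : Int) ≤ lo := by
      by_contra hc
      have hjlen : lo.toNat < ks.length := by omega
      have h2 := hinv2 lo.toNat hjlen (by omega)
      have h1 := getElem_lt_of_lt_lowIdx value ks lo.toNat hjlen (by omega)
      omega
    omega
termination_by (hi - lo).toNat
decreasing_by
  · omega
  · omega

-- A's scan over range(a, n) returns lowIdx (clamped by its default) once everything below a failed
lemma scan_eq (ks : List Int) (value : Int) (idx : Int)
    (a : Nat) (ha1 : 1 ≤ a) (ha2 : a ≤ lowIdx value ks) :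
    getFramingScan ks value (PySem.List.pyRange (a : Int) (ks.length : Int)) idx
      = if lowIdx value ks < ks.length then (lowIdx value ks : Int) else idx := by
  have hL := lowIdx_le_length value ks
  by_cases hab : a < ks.length
  · have hcons : PySem.List.pyRange (a : Int) (ks.length : Int) =
        (a : Int) :: PySem.List.pyRange ((a : Int) + 1) (ks.length : Int) :=
      PySem.List.pyRange_one_cons (by exact_mod_cast hab)
    rw [hcons]
    simp only [getFramingScan]
    have hga : PySem.List.pyGet? ks (a : Int) = some (ks[a]'hab) := by
      rw [PySem.List.pyGet?_natCast]; simp [hab]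
    have ham1 : ((a : Int) - 1) = ((a - 1 : Nat) : Int) := by omega
    have ham1lt : a - 1 < ks.length := by omega
    have hga1 : PySem.List.pyGet? ks ((a : Int) - 1) = some (ks[a - 1]'ham1lt) := by
      rw [ham1, PySem.List.pyGet?_natCast]
      simp [List.getElem?_eq_getElem ham1lt]
    rw [hga, hga1]
    simp only [Option.getD_some]
    rcases Nat.lt_or_ge a (lowIdx value ks) with hc | hc
    · have hfalse : ¬ value ≤ ks[a]'hab := by
        have := getElem_lt_of_lt_lowIdx value ks a hab hc
        omega
      rw [if_neg (by tauto)]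
      have hcast : ((a : Int) + 1) = ((a + 1 : Nat) : Int) := by omega
      rw [hcast]
      exact scan_eq ks value idx (a + 1) (by omega) (by omega)
    · have hae : a = lowIdx value ks := by omega
      subst hae
      have h1 : ks[lowIdx value ks - 1]'ham1lt < value :=
        getElem_lt_of_lt_lowIdx value ks (lowIdx value ks - 1) ham1lt (by omega)
      have h2 : value ≤ ks[lowIdx value ks]'hab := le_getElem_lowIdx value ks hab
      rw [if_pos ⟨h1, h2⟩, if_pos hab]
  · have hnil : PySem.List.pyRange (a : Int) (ks.length : Int) = [] :=
      PySem.List.pyRange_one_eq_nil (by exact_mod_cast (by omega : ks.length ≤ a))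
    rw [hnil]
    simp only [getFramingScan]
    rw [if_neg (by omega)]
termination_by ks.length - a
decreasing_by omega

-- ===== VERDICT (by name: the statement is the Claim_ definition above) =====
theorem getFraming_spec : Claim_equal_getFraming := by
  unfold Claim_equal_getFraming
  intro dic value hdom hpre
  unfold Spec_getFraming
  simp only [Pre_getFraming] at hpre
  obtain ⟨hne, -⟩ := hpre
  simp only [getFraming, getFraming_alt]
  set ks := PySem.List.sorted ((PySem.Dict.ofList dic).keys) id with hks
  have hn : 0 < ks.length := List.length_pos_iff.mpr hne
  have hpw : ks.Pairwise (· ≤ ·) := by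
    simpa using PySem.List.sorted_pairwise ((PySem.Dict.ofList dic).keys) id
  by_cases hv : value ≤ (PySem.List.pyGet? ks 0).getD 0
  · rw [if_pos hv, if_pos hv]
  · rw [if_neg hv, if_neg hv]
    have hget0 : PySem.List.pyGet? ks 0 = some (ks[0]'hn) := by
      rw [PySem.List.pyGet?_zero]
      simp [List.getElem?_eq_getElem hn]
    rw [hget0] at hv
    simp only [Option.getD_some] at hv
    have hL1 : 1 ≤ lowIdx value ks := one_le_lowIdx value ks hn hv
    have hL := lowIdx_le_length value ks
    have hlow : bsearchLow ks value 0 (ks.length : Int) = (lowIdx value ks : Int) :=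
      bsearchLow_eq ks value hpw 0 (ks.length : Int) (by omega) (by omega) (by omega)
        (fun j hj hjlt => by omega)
        (fun j hj hjge => by omega)
    have hscan := scan_eq ks value ((ks.length : Int) - 1) 1 (by omega) hL1
    have hcast1 : ((1 : Nat) : Int) = (1 : Int) := by norm_num
    rw [hcast1] at hscan
    rw [hscan, hlow]
    have heq : (if lowIdx value ks < ks.length then (lowIdx value ks : Int)
          else (ks.length : Int) - 1)
        = (if (lowIdx value ks : Int) = (ks.length : Int) then (ks.length : Int) - 1
          else (lowIdx value ks : Int)) := by
      split_ifs <;> omega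
    rw [heq]
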